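-- pv_equiv track=rewrite | github.com/hyu-likelion/NESI | week1/김상효/week1_session/palindrom.py | student_func
-- ===== SOURCE A (Python) =====
-- def student_func(input_val):
--     munjang = ""
--     word_list = input_val.lower().split()
--     for i in word_list:
--         munjang += i
--
--     half = int(len(munjang)/2)
--     for i in range(half):
--         if(munjang[i] == munjang[len(munjang) - 1 - i]):
--             pass
--         else:
--             return False
--
--     return True
-- ===== SOURCE B (Python) =====
-- def student_func(input_val):
--     s = "".join(input_val.lower().split())
--     return s == s[::-1]
-- ===== Notes on version B (the rewrite author's own statement) =====
-- stated objective: idiomatic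
-- what changed: Replaced the explicit index loop comparing mirrored characters (with the halfway point computed via int(len/2)) by the standard Python idiom s == s[::-1] on the same joined lowercase string.
import Mathlib
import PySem

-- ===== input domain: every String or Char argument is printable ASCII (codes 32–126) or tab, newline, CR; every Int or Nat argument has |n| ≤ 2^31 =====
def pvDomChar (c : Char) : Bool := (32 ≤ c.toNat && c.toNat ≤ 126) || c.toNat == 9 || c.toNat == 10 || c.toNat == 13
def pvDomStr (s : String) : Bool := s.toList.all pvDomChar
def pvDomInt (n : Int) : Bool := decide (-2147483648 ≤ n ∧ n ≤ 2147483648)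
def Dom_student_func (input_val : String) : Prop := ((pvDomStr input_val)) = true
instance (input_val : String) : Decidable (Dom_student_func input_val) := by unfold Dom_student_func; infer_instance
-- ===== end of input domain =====

-- B replaces A's explicit mirrored-index loop by the idiomatic reverse-and-compare; same return value everywhere.

-- ===== PORT A =====
-- the 'for i in range(half): if munjang[i] == munjang[len-1-i]: pass else: return False' loop,
-- as structural recursion on the loop counter (early return False preserved).
def pvLoopA (munjang : List Char) (half : Nat) (i : Nat) : Bool :=
  if _h : i < half then
    if PySem.List.pyGetD munjang (i : Int) ' '
       == PySem.List.pyGetD munjang (PySem.List.len munjang - 1 - (i : Int)) ' ' then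
      pvLoopA munjang half (i + 1)
    else
      false
  else
    true
termination_by half - i

def student_func (input_val : String) : Bool :=
  -- munjang = "".join(input_val.lower().split())  (fold of '+=' over the word list)
  let word_list := PySem.Chars.split₀ (PySem.Chars.lower input_val.toList)
  let munjang := word_list.foldl (fun acc w => acc ++ w) []
  -- half = int(len(munjang)/2): exact float halving then truncation = Nat division by 2 on this domain
  let half := munjang.length / 2
  pvLoopA munjang half 0

-- ===== PORT B =====
def student_func_alt (input_val : String) : Bool :=
  let s := PySem.Chars.join [] (PySem.Chars.split₀ (PySem.Chars.lower input_val.toList))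
  -- s == s[::-1]; the step -1 slice never raises, so the .getD default is never used
  decide (s = (PySem.List.slice? s none none (-1)).getD [])

-- ===== PRECONDITION & SPEC =====
def Spec_student_func (input_val : String) (out : Bool) : Prop := out = student_func_alt input_val
instance (input_val : String) (out : Bool) : Decidable (Spec_student_func input_val out) := by unfold Spec_student_func; infer_instance

-- ===== CLAIM (what is proved, stated in full; the proofs are below) =====
def Claim_equal_student_func : Prop := ∀ (input_val : String), Dom_student_func input_val → Spec_student_func input_val (student_func input_val)

-- ===== LEMMAS AND PROOFS =====

-- A's loop from counter i decides the mirrored-character condition on the remaining indices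
theorem pvLoopA_eq (munjang : List Char) (half i : Nat) :
    pvLoopA munjang half i =
      decide (∀ j, i ≤ j → j < half →
        PySem.List.pyGetD munjang (j : Int) ' '
          = PySem.List.pyGetD munjang (PySem.List.len munjang - 1 - (j : Int)) ' ') := by
  fun_induction pvLoopA munjang half i with
  | case1 i h heq ih =>
    rw [ih]
    simp only [decide_eq_decide]
    constructor
    · intro hall j hij hj
      rcases Nat.eq_or_lt_of_le hij with rfl | hlt
      · exact beq_iff_eq.mp heq
      · exact hall j hlt hj
    · intro hall j hij hj
      exact hall j (le_of_lt hij) hj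
  | case2 i h heq =>
    symm
    simp only [decide_eq_false_iff_not]
    intro hall
    exact heq (beq_iff_eq.mpr (hall i le_rfl h))
  | case3 i h =>
    symm
    simp only [decide_eq_true_iff]
    intro j hij hj
    omega

-- the mirrored-half condition characterises being one's own reverse
theorem palindrome_iff_half (l : List Char) :
    (∀ j, j < l.length / 2 →
        PySem.List.pyGetD l (j : Int) ' '
          = PySem.List.pyGetD l (PySem.List.len l - 1 - (j : Int)) ' ')
      ↔ l = l.reverse := by
  have hidx : ∀ j (hj : j < l.length),
      PySem.List.pyGetD l (j : Int) ' ' = l[j]'hj := by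
    intro j hj
    simp [PySem.List.pyGetD_natCast, List.getD_eq_getElem?_getD, List.getElem?_eq_getElem hj]
  have hmir : ∀ j (hj : j < l.length),
      PySem.List.pyGetD l (PySem.List.len l - 1 - (j : Int)) ' '
        = l[l.length - 1 - j]'(by omega) := by
    intro j hj
    have h1 : PySem.List.len l - 1 - (j : Int) = ((l.length - 1 - j : Nat) : Int) := by
      simp [PySem.List.len_eq]; omega
    rw [h1, PySem.List.pyGetD_natCast, List.getD_eq_getElem?_getD,
        List.getElem?_eq_getElem (by omega), Option.getD_some]
  constructor
  · intro h
    apply List.ext_getElem (by simp)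
    intro i hi _
    rw [List.getElem_reverse]
    by_cases hcase : i < l.length / 2
    · have := h i hcase
      rw [hidx i (by omega), hmir i (by omega)] at this
      exact this
    · by_cases hmid : l.length - 1 - i < l.length / 2
      · have := h (l.length - 1 - i) hmid
        rw [hidx _ (by omega), hmir _ (by omega)] at this
        have harg : l.length - 1 - (l.length - 1 - i) = i := by omega
        simp only [harg] at this
        exact this.symm
      · -- middle element of an odd-length list: i = l.length - 1 - i
        have : i = l.length - 1 - i := by omega
        congr 1
  · intro h j hj
    have hj' : j < l.length := by omega
    rw [hidx j hj', hmir j hj']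
    have h2 : l[j]'hj' = l.reverse[j]'(by simpa using hj') := List.getElem_of_eq h hj'
    rw [h2, List.getElem_reverse]

-- ''.join(ws) equals folding '+=' over ws
theorem join_eq_foldl (ws : List (List Char)) :
    PySem.Chars.join [] ws = ws.foldl (fun acc w => acc ++ w) [] := by
  have : ∀ (ws : List (List Char)) (acc : List Char),
      acc ++ PySem.Chars.join [] ws = ws.foldl (fun acc w => acc ++ w) acc := by
    intro ws
    induction ws with
    | nil => intro acc; simp [PySem.Chars.join, List.intercalate]
    | cons w ws ih =>
      intro acc
      cases ws with
      | nil => simp [PySem.Chars.join, List.intercalate]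
      | cons w' ws' =>
        rw [PySem.Chars.join_cons_cons]
        simpa using ih (acc ++ w)
  simpa using this ws []

-- A's whole scan equals B's reverse-and-compare, for any character list
theorem main_aux (l : List Char) :
    pvLoopA l (l.length / 2) 0
      = decide (l = (PySem.List.slice? l none none (-1)).getD []) := by
  rw [pvLoopA_eq, PySem.List.slice?_none_none_neg_one]
  simp only [Option.getD_some, decide_eq_decide]
  rw [← palindrome_iff_half l]
  constructor
  · intro h j hj; exact h j (Nat.zero_le j) hj
  · intro h j _ hj; exact h j hj

-- ===== VERDICT (by name: the statement is the Claim_ definition above) =====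
theorem student_func_spec : Claim_equal_student_func := by
  intro input_val _
  unfold Spec_student_func student_func student_func_alt
  rw [join_eq_foldl]
  exact main_aux _
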